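-- pv_equiv track=rewrite | github.com/kentnf/VirusDetect | src/virusdetect/identify.py | normalize_seq_id
-- ===== SOURCE A (Python) =====
-- def normalize_seq_id(raw_value: str) -> str:
--     token = raw_value.strip().split()[0]
--     if token.startswith("lcl|"):
--         token = token[4:]
--     if "|" not in token:
--         return token
--
--     parts = [part for part in token.split("|") if part]
--     for marker in ("ref", "gb", "emb", "dbj", "sp", "tr"):
--         if marker in parts:
--             index = parts.index(marker)
--             if index + 1 < len(parts):
--                 return parts[index + 1]
--     return parts[-1]
-- ===== SOURCE B (Python) =====
-- def normalize_seq_id(raw_value: str) -> str: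
--     token = raw_value.strip().split()[0]
--     if token.startswith("lcl|"):
--         token = token[4:]
--     if "|" not in token:
--         return token
--
--     parts = [part for part in token.split("|") if part]
--     rank = {"ref": 0, "gb": 1, "emb": 2, "dbj": 3, "sp": 4, "tr": 5}
--     best_rank, best = 6, parts[-1]
--     for part, nxt in zip(parts, parts[1:]):
--         r = rank.get(part, 6)
--         if r < best_rank:
--             best_rank, best = r, nxt
--     return best
-- ===== Notes on version B (the rewrite author's own statement) =====
-- stated objective: alternative
-- what changed: Replaces A's six staged membership+list.index scans in marker-priority order with a single argmin pass over adjacent pairs zip(parts, parts[1:]): each pair's leading part is ranked by a priority table and the follower of the lowest-ranked (first such) pair wins, with parts[-1] as the initial fallback; the strict comparison makes later occurrences of a marker irrelevant, matching A's first-occurrence rule.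
import Mathlib
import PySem

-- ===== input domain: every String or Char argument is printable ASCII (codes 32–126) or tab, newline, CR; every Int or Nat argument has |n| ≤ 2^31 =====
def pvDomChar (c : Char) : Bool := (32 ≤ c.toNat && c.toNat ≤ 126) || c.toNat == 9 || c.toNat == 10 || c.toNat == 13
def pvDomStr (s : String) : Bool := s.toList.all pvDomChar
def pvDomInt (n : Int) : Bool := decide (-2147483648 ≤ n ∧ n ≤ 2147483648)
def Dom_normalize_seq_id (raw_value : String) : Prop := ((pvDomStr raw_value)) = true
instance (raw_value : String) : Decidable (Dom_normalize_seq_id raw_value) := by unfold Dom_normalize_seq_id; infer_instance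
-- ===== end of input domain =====

-- B replaces A's six staged membership+index scans (marker priority order) by ONE argmin pass
-- over the adjacent pairs zip(parts, parts[1:]) ranked by a priority table; equal wherever A returns (Pre_).

-- ===== PORT A =====
def pvMarkers : List String := ["ref", "gb", "emb", "dbj", "sp", "tr"]

-- A's 'for marker in (...)' loop: first marker present in parts with a following element
def pvALoop (parts : List String) : List String → Option String
  | [] => none
  | m :: ms =>
    if m ∈ parts then
      match PySem.List.index? parts m with
      | some i =>
        if i + 1 < parts.length then PySem.List.pyGet? parts ((i : Int) + 1)
        else pvALoop parts ms
      | none => pvALoop parts ms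
    else pvALoop parts ms

def normalize_seq_id (raw_value : String) : String :=
  match (PySem.Str.split₀ (PySem.Str.strip raw_value)).head? with
  | none => ""  -- Python raises IndexError here; excluded by Pre_
  | some tok0 =>
    let token := if PySem.Str.startswith tok0 "lcl|" then PySem.Str.slice tok0 (some 4) none else tok0
    if PySem.Str.isIn "|" token = false then token
    else
      let parts := ((PySem.Str.split? token "|").getD []).filter (fun p => decide (p ≠ ""))
      match pvALoop parts pvMarkers with
      | some r => r
      | none =>
        match PySem.List.pyGet? parts (-1) with
        | some r => r
        | none => ""  -- Python raises IndexError (parts == []); excluded by Pre_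

-- ===== PORT B =====
-- Source B: rank = {"ref": 0, ..., "tr": 5}
def pvRank : PySem.Dict String Int :=
  PySem.Dict.ofList [("ref", 0), ("gb", 1), ("emb", 2), ("dbj", 3), ("sp", 4), ("tr", 5)]

-- Source B loop body: r = rank.get(part, 6); if r < best_rank: best_rank, best = r, nxt
def pvStep (s : Int × String) (pq : String × String) : Int × String :=
  let r := PySem.Dict.getD pvRank pq.1 6
  if r < s.1 then (r, pq.2) else s

def normalize_seq_id_alt (raw_value : String) : String :=
  match (PySem.Str.split₀ (PySem.Str.strip raw_value)).head? with
  | none => ""  -- Python raises IndexError here; excluded by Pre_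
  | some tok0 =>
    let token := if PySem.Str.startswith tok0 "lcl|" then PySem.Str.slice tok0 (some 4) none else tok0
    if PySem.Str.isIn "|" token = false then token
    else
      let parts := ((PySem.Str.split? token "|").getD []).filter (fun p => decide (p ≠ ""))
      match PySem.List.pyGet? parts (-1) with
      | none => ""  -- Python raises IndexError (parts == []); excluded by Pre_
      | some last =>
        ((parts.zip (PySem.List.slice parts (some 1) none)).foldl pvStep (6, last)).2

-- ===== PRECONDITION & SPEC =====
-- the token A works on (first whitespace word, with a leading "lcl|" removed); used only by Pre_
def pvPreToken (raw_value : String) : String :=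
  let tok := ((PySem.Str.split₀ (PySem.Str.strip raw_value)).headD "")
  if PySem.Str.startswith tok "lcl|" then PySem.Str.slice tok (some 4) none else tok

-- Pre_ excludes exactly the inputs where Python A raises IndexError: a whitespace-only string
-- (split()[0] fails) or a first token whose '|'-separated parts are all empty (parts[-1] fails).
def Pre_normalize_seq_id (raw_value : String) : Prop :=
  PySem.Str.split₀ (PySem.Str.strip raw_value) ≠ [] ∧
  (PySem.Str.isIn "|" (pvPreToken raw_value) = false ∨
    ((PySem.Str.split? (pvPreToken raw_value) "|").getD []).filter (fun p => decide (p ≠ "")) ≠ [])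
instance (raw_value : String) : Decidable (Pre_normalize_seq_id raw_value) := by
  unfold Pre_normalize_seq_id; infer_instance

def pvWitness_normalize_seq_id : String := "gi|529217|gb|U12345.1|HSU12345"

def Spec_normalize_seq_id (raw_value : String) (out : String) : Prop := out = normalize_seq_id_alt raw_value
instance (raw_value : String) (out : String) : Decidable (Spec_normalize_seq_id raw_value out) := by unfold Spec_normalize_seq_id; infer_instance

-- ===== CLAIM (what is proved, stated in full; the proofs are below) =====
def Claim_equal_normalize_seq_id : Prop := ∀ (raw_value : String), Dom_normalize_seq_id raw_value → Pre_normalize_seq_id raw_value → Spec_normalize_seq_id raw_value (normalize_seq_id raw_value)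

-- ===== LEMMAS AND PROOFS =====

-- priority search over a list of (part, follower) pairs: first marker in ms having a pair
def pvMS (l : List (String × String)) : List String → Option String
  | [] => none
  | m :: ms =>
    match l.find? (fun pq => pq.1 == m) with
    | some pq => some pq.2
    | none => pvMS l ms

theorem pvMS_nil : ∀ (ms : List String), pvMS [] ms = none
  | [] => rfl
  | _ :: ms => by simp [pvMS, pvMS_nil ms]

theorem pvMS_skip (pq : String × String) (l : List (String × String)) :
    ∀ (ms : List String), (∀ m ∈ ms, pq.1 ≠ m) → pvMS (pq :: l) ms = pvMS l ms
  | [], _ => rfl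
  | m :: ms, h => by
    have h1 : (pq.1 == m) = false := beq_eq_false_iff_ne.mpr (h m (by simp))
    have hf : List.find? (fun pq' => pq'.1 == m) (pq :: l) = List.find? (fun pq' => pq'.1 == m) l := by
      rw [List.find?_cons_of_neg]
      simp [h1]
    simp only [pvMS, hf, pvMS_skip pq l ms (fun m' hm' => h m' (by simp [hm']))]

theorem pvMS_append (l : List (String × String)) :
    ∀ (ms1 ms2 : List String), pvMS l (ms1 ++ ms2)
      = match pvMS l ms1 with | some v => some v | none => pvMS l ms2
  | [], ms2 => by simp [pvMS]
  | m :: ms1, ms2 => by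
    simp only [List.cons_append, pvMS]
    cases l.find? (fun pq => pq.1 == m) with
    | some pq => rfl
    | none => exact pvMS_append l ms1 ms2

-- the zip pair search for one marker, in terms of A's index?/pyGet?
theorem pvFindZip (m : String) :
    ∀ (parts : List String),
    (parts.zip parts.tail).find? (fun pq => pq.1 == m)
      = (PySem.List.index? parts m).bind
          (fun i => (PySem.List.pyGet? parts ((i : Int) + 1)).map (fun v => (m, v)))
  | [] => by simp [PySem.List.index?]
  | p :: parts => by
    by_cases hp : p = m
    · subst hp
      rw [PySem.List.index?_cons_self]
      cases parts with
      | nil => simp [PySem.List.pyGet?, PySem.List.pyIdx?]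
      | cons q rest =>
        simp [PySem.List.pyGet?_natCast]
    · rw [PySem.List.index?_cons_of_ne _ hp]
      have hpm : (p == m) = false := beq_eq_false_iff_ne.mpr hp
      cases parts with
      | nil => simp [PySem.List.index?]
      | cons q rest =>
        have hf : List.find? (fun pq => pq.1 == m) ((p, q) :: (q :: rest).zip rest)
            = List.find? (fun pq => pq.1 == m) ((q :: rest).zip rest) := by
          rw [List.find?_cons_of_neg]
          simp [hpm]
        rw [List.tail_cons, List.zip_cons_cons, hf]
        have := pvFindZip m (q :: rest)
        rw [show (q :: rest).tail = rest from rfl] at this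
        rw [this]
        cases hi : PySem.List.index? (q :: rest) m with
        | none => simp
        | some i =>
          have hc : ((i + 1 : Nat) : Int) + 1 = (((i + 1) + 1 : Nat) : Int) := by push_cast; ring
          have hc2 : ((i : Nat) : Int) + 1 = ((i + 1 : Nat) : Int) := by push_cast; ring
          simp only [Option.map_some, Option.bind_some, hc, hc2, PySem.List.pyGet?_natCast,
            List.getElem?_cons_succ]

-- A's marker loop is the pair search in priority order
theorem pvALoop_eq_MS (parts : List String) :
    ∀ (ms : List String), pvALoop parts ms = pvMS (parts.zip parts.tail) ms
  | [] => rfl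
  | m :: ms => by
    rw [pvALoop, pvMS, pvFindZip m parts]
    cases hi : PySem.List.index? parts m with
    | none =>
      have hmem : m ∉ parts := (PySem.List.index?_eq_none_iff parts m).mp hi
      simp [hmem, pvALoop_eq_MS parts ms]
    | some i =>
      have hmem : m ∈ parts := (PySem.List.index?_isSome_iff parts m).mp (by rw [hi]; rfl)
      by_cases hlt : i + 1 < parts.length
      · have hg : PySem.List.pyGet? parts ((i : Int) + 1) = some parts[i + 1] := by
          rw [show ((i : Nat) : Int) + 1 = ((i + 1 : Nat) : Int) from by push_cast; ring,
              PySem.List.pyGet?_natCast, List.getElem?_eq_getElem hlt]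
        simp [hmem, hlt, hg]
      · have hg : PySem.List.pyGet? parts ((i : Int) + 1) = none := by
          rw [show ((i : Nat) : Int) + 1 = ((i + 1 : Nat) : Int) from by push_cast; ring,
              PySem.List.pyGet?_natCast, List.getElem?_eq_none (by omega)]
        simp [hmem, hlt, hg, pvALoop_eq_MS parts ms]

-- the priority table is the index in pvMarkers (6 = absent)
theorem pvRank_eq (p : String) :
    PySem.Dict.getD pvRank p 6
      = (match PySem.List.index? pvMarkers p with | some j => (j : Int) | none => 6) := by
  by_cases h1 : p = "ref"; · subst h1; decide
  by_cases h2 : p = "gb"; · subst h2; decide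
  by_cases h3 : p = "emb"; · subst h3; decide
  by_cases h4 : p = "dbj"; · subst h4; decide
  by_cases h5 : p = "sp"; · subst h5; decide
  by_cases h6 : p = "tr"; · subst h6; decide
  have b1 : ("ref" == p) = false := beq_eq_false_iff_ne.mpr (Ne.symm h1)
  have b2 : ("gb" == p) = false := beq_eq_false_iff_ne.mpr (Ne.symm h2)
  have b3 : ("emb" == p) = false := beq_eq_false_iff_ne.mpr (Ne.symm h3)
  have b4 : ("dbj" == p) = false := beq_eq_false_iff_ne.mpr (Ne.symm h4)
  have b5 : ("sp" == p) = false := beq_eq_false_iff_ne.mpr (Ne.symm h5)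
  have b6 : ("tr" == p) = false := beq_eq_false_iff_ne.mpr (Ne.symm h6)
  have hitems : pvRank.items = [("ref", (0 : Int)), ("gb", 1), ("emb", 2), ("dbj", 3), ("sp", 4), ("tr", 5)] := by decide
  rw [PySem.List.index?_eq_idxOf?]
  simp [pvMarkers, PySem.Dict.getD, PySem.Dict.get?, hitems,
    List.idxOf?, List.findIdx?, List.findIdx?.go, List.find?, b1, b2, b3, b4, b5, b6]

theorem pvRank_of_none {p : String} (hi : PySem.List.index? pvMarkers p = none) :
    PySem.Dict.getD pvRank p 6 = 6 := by rw [pvRank_eq, hi]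

theorem pvRank_of_some {p : String} {j : Nat} (hi : PySem.List.index? pvMarkers p = some j) :
    PySem.Dict.getD pvRank p 6 = (j : Int) := by rw [pvRank_eq, hi]

-- membership in a take-prefix gives an index? below the cut
theorem pvMemTakeIndex : ∀ (l : List String) (x : String) (k : Nat), x ∈ l.take k →
    ∃ i, PySem.List.index? l x = some i ∧ i < k
  | _, _, 0, h => by simp at h
  | [], _, _ + 1, h => by simp at h
  | a :: t, x, k + 1, h => by
    rw [List.take_succ_cons] at h
    by_cases hax : a = x
    · subst hax
      exact ⟨0, PySem.List.index?_cons_self a t, by omega⟩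
    · have hx : x ∈ t.take k := by
        cases List.mem_cons.mp h with
        | inl h' => exact absurd h'.symm hax
        | inr h' => exact h'
      obtain ⟨i, hi, hik⟩ := pvMemTakeIndex t x k hx
      refine ⟨i + 1, ?_, by omega⟩
      rw [PySem.List.index?_cons_of_ne _ hax, hi]
      rfl

-- B's argmin fold computes the priority search over the first k markers
theorem pvFold_eq_MS :
    ∀ (l : List (String × String)) (k : Nat), k ≤ 6 → ∀ (b : String),
    (l.foldl pvStep ((k : Int), b)).2 = (pvMS l (pvMarkers.take k)).getD b
  | [], k, _, b => by simp [pvMS_nil]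
  | pq :: l, k, hk, b => by
    rw [List.foldl_cons]
    cases hi : PySem.List.index? pvMarkers pq.1 with
    | none =>
      have hmem : pq.1 ∉ pvMarkers := (PySem.List.index?_eq_none_iff _ _).mp hi
      have hstep : pvStep ((k : Int), b) pq = ((k : Int), b) := by
        simp only [pvStep, pvRank_of_none hi]
        rw [if_neg (by simp; omega)]
      rw [hstep, pvMS_skip pq l _ (fun m hm he => hmem (by
        rw [he]; exact List.mem_of_mem_take hm))]
      exact pvFold_eq_MS l k hk b
    | some j =>
      obtain ⟨hj, hget, hmin⟩ := PySem.List.getElem_of_index?_eq_some hi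
      have hj6 : j < 6 := by simpa [pvMarkers] using hj
      by_cases hjk : j < k
      · have hstep : pvStep ((k : Int), b) pq = ((j : Int), pq.2) := by
          simp only [pvStep, pvRank_of_some hi]
          rw [if_pos (by simp; exact_mod_cast hjk)]
        rw [hstep, pvFold_eq_MS l j (by omega) pq.2]
        have hdec : pvMarkers.take k
            = pvMarkers.take j ++ pvMarkers[j] :: (pvMarkers.take k).drop (j + 1) := by
          conv_lhs => rw [← List.take_append_drop j (pvMarkers.take k)]
          rw [List.take_take, min_eq_left (by omega)]
          congr 1
          rw [List.drop_eq_getElem_cons (by simp [pvMarkers]; omega)]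
          congr 1
          simp [pvMarkers]
        rw [hdec, pvMS_append]
        have hskip : pvMS (pq :: l) (pvMarkers.take j) = pvMS l (pvMarkers.take j) := by
          refine pvMS_skip pq l _ (fun m hm he => ?_)
          obtain ⟨i, hi', hik⟩ := pvMemTakeIndex pvMarkers m j hm
          rw [← he, hi] at hi'
          simp at hi'
          omega
        rw [hskip]
        cases pvMS l (pvMarkers.take j) with
        | some v => simp
        | none =>
          have hf : List.find? (fun pq' => pq'.1 == pvMarkers[j]) (pq :: l) = some pq := by
            rw [List.find?_cons_of_pos]
            simp only [beq_iff_eq]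
            exact hget.symm
          simp only [pvMS, hf, Option.getD_some, Option.getD_none]
      · have hstep : pvStep ((k : Int), b) pq = ((k : Int), b) := by
          simp only [pvStep, pvRank_of_some hi]
          rw [if_neg (by simp; omega)]
        have hskip : pvMS (pq :: l) (pvMarkers.take k) = pvMS l (pvMarkers.take k) := by
          refine pvMS_skip pq l _ (fun m hm he => ?_)
          obtain ⟨i, hi', hik⟩ := pvMemTakeIndex pvMarkers m k hm
          rw [← he, hi] at hi'
          simp at hi'
          omega
        rw [hstep, hskip]
        exact pvFold_eq_MS l k hk b

-- A's loop finds nothing in an empty parts list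
theorem pvALoop_nil : ∀ (ms : List String), pvALoop [] ms = none
  | [] => rfl
  | _ :: ms => by simp [pvALoop, pvALoop_nil ms]

-- the shared tail of the two ports, as one rewrite rule over the parts list
theorem pvCore (parts : List String) :
    (match pvALoop parts pvMarkers with
     | some r => r
     | none =>
       match PySem.List.pyGet? parts (-1) with
       | some r => r
       | none => "")
    = (match PySem.List.pyGet? parts (-1) with
       | none => ""
       | some last =>
         ((parts.zip (PySem.List.slice parts (some 1) none)).foldl pvStep (6, last)).2) := by
  cases parts with
  | nil => simp [pvALoop_nil, PySem.List.pyGet?, PySem.List.pyIdx?]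
  | cons p rest =>
    rw [PySem.List.pyGet?_neg_one]
    cases hl : (p :: rest).getLast? with
    | none => simp at hl
    | some last =>
      show (match pvALoop (p :: rest) pvMarkers with
            | some r => r
            | none => last)
          = (List.foldl pvStep (6, last)
              ((p :: rest).zip (PySem.List.slice (p :: rest) (some 1) none))).2
      have hfold := pvFold_eq_MS ((p :: rest).zip ((p :: rest).tail)) 6 (by omega) last
      rw [Nat.cast_ofNat] at hfold
      rw [PySem.List.slice_from_one, hfold,
          show pvMarkers.take 6 = pvMarkers from rfl, ← pvALoop_eq_MS]
      cases pvALoop (p :: rest) pvMarkers with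
      | some r => rfl
      | none => rfl
-- the two ports are equal on every input (both return "" on the inputs Pre_ excludes)
theorem pvPorts_eq (raw_value : String) : normalize_seq_id raw_value = normalize_seq_id_alt raw_value := by
  unfold normalize_seq_id normalize_seq_id_alt
  cases (PySem.Str.split₀ (PySem.Str.strip raw_value)).head? with
  | none => rfl
  | some tok0 => simp only [pvCore]

-- ===== VERDICT (by name: the statement is the Claim_ definition above) =====
theorem normalize_seq_id_spec : Claim_equal_normalize_seq_id := by
  intro raw_value _ _
  unfold Spec_normalize_seq_id
  exact pvPorts_eq raw_value
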